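-- pv_equiv track=rewrite | github.com/characterma/canton-target-sentiment | src/dataset/chinese_word_segmentation.py | get_word_level_tags
-- ===== SOURCE A (Python) =====
-- def get_word_level_tags(tokens, token_tags):
--     words = []
--     tags = []
--
--     cur_word = ''
--     cur_tag = ''
--     for token, tag in zip(tokens, token_tags):
--         if tag.startswith('B-'):
--             if cur_word:
--                 words.append(cur_word)
--                 tags.append(cur_tag)
--             cur_word = token
--             cur_tag = tag
--         elif tag.startswith('B-') or tag=='O':
--             cur_word = cur_word + token
--         else:
--             continue
--
--     words.append(cur_word)
--     tags.append(cur_tag)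
--     return words, tags
-- ===== SOURCE B (Python) =====
-- def get_word_level_tags(tokens, token_tags):
--     # collect-then-filter: one pass builds [word, tag] segments, a second pass emits them
--     segments = [['', '']]
--     for token, tag in zip(tokens, token_tags):
--         if tag.startswith('B-'):
--             segments.append([token, tag])
--         elif tag == 'O':
--             segments[-1][0] += token
--     words = []
--     tags = []
--     for word, tag in segments[:-1]:
--         if word:
--             words.append(word)
--             tags.append(tag)
--     words.append(segments[-1][0])
--     tags.append(segments[-1][1])
--     return words, tags
-- ===== Notes on version B (the rewrite author's own statement) =====
-- stated objective: alternative
-- what changed: Replaces A's four-variable emit-while-scanning loop by a collect-then-filter decomposition: one pass builds a list of [word, tag] segments, a second pass filters out empty non-final segments and emits the final one unconditionally.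
import Mathlib
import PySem

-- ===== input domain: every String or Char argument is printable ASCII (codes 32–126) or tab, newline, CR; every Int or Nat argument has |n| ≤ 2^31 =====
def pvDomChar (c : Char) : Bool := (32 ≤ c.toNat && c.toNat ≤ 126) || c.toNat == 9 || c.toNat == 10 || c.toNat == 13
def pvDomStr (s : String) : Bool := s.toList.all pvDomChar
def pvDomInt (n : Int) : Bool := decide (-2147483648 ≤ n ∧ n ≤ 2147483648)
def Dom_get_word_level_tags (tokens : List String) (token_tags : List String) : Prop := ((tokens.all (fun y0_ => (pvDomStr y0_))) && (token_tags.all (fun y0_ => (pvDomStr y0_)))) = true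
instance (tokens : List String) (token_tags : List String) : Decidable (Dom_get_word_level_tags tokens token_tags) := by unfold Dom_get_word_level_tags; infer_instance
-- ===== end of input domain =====

-- B replaces A's emit-while-scanning loop by a collect-then-filter decomposition (alternative, same cost).


-- ===== PORT A =====
def pvLoopA : List (String × String) → List String → List String → String → String → List String × List String
  | [], ws, ts, cw, ct => (ws ++ [cw], ts ++ [ct])
  | (tok, tag) :: rest, ws, ts, cw, ct =>
    if tag.startsWith "B-" then
      (if cw ≠ "" then pvLoopA rest (ws ++ [cw]) (ts ++ [ct]) tok tag
       else pvLoopA rest ws ts tok tag)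
    else if tag.startsWith "B-" || tag == "O" then pvLoopA rest ws ts (cw ++ tok) ct
    else pvLoopA rest ws ts cw ct

def get_word_level_tags (tokens : List String) (token_tags : List String) : List String × List String :=
  pvLoopA (tokens.zip token_tags) [] [] "" ""

-- ===== PORT B =====
-- first pass: build the segment list in order, carrying the open last segment
def pvSegs : List (String × String) → String × String → List (String × String)
  | [], cur => [cur]
  | (tok, tag) :: rest, cur =>
    if tag.startsWith "B-" then cur :: pvSegs rest (tok, tag)
    else if tag == "O" then pvSegs rest (cur.1 ++ tok, cur.2)
    else pvSegs rest cur

-- second pass: emit non-empty segments, the last one unconditionally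
def pvEmit : List (String × String) → List String × List String
  | [] => ([], [])
  | [last] => ([last.1], [last.2])
  | (w, g) :: rest =>
    let r := pvEmit rest
    if w ≠ "" then (w :: r.1, g :: r.2) else r

def get_word_level_tags_alt (tokens : List String) (token_tags : List String) : List String × List String :=
  pvEmit (pvSegs (tokens.zip token_tags) ("", ""))

-- ===== PRECONDITION & SPEC =====
def Spec_get_word_level_tags (tokens : List String) (token_tags : List String) (out : List String × List String) : Prop := out = get_word_level_tags_alt tokens token_tags
instance (tokens : List String) (token_tags : List String) (out : List String × List String) : Decidable (Spec_get_word_level_tags tokens token_tags out) := by unfold Spec_get_word_level_tags; infer_instance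

-- ===== CLAIM (what is proved, stated in full; the proofs are below) =====
def Claim_equal_get_word_level_tags : Prop := ∀ (tokens : List String) (token_tags : List String), Dom_get_word_level_tags tokens token_tags → Spec_get_word_level_tags tokens token_tags (get_word_level_tags tokens token_tags)

-- ===== LEMMAS AND PROOFS =====
lemma pvSegs_ne_nil (l : List (String × String)) (cur : String × String) :
    pvSegs l cur ≠ [] := by
  induction l generalizing cur with
  | nil => simp [pvSegs]
  | cons h t ih =>
    obtain ⟨tok, tag⟩ := h
    simp only [pvSegs]
    split_ifs <;> simp_all

lemma pvEmit_cons (w g : String) (rest : List (String × String)) (h : rest ≠ []) :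
    pvEmit ((w, g) :: rest) =
      (if w ≠ "" then ((w :: (pvEmit rest).1, g :: (pvEmit rest).2)) else pvEmit rest) := by
  cases rest with
  | nil => exact absurd rfl h
  | cons a t => rfl

lemma pvLoopA_eq (l : List (String × String)) :
    ∀ (cw ct : String) (ws ts : List String),
      pvLoopA l ws ts cw ct =
        (ws ++ (pvEmit (pvSegs l (cw, ct))).1, ts ++ (pvEmit (pvSegs l (cw, ct))).2) := by
  induction l with
  | nil => intro cw ct ws ts; simp [pvLoopA, pvSegs, pvEmit]
  | cons h t ih =>
    obtain ⟨tok, tag⟩ := h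
    intro cw ct ws ts
    simp only [pvLoopA, pvSegs]
    by_cases hb : tag.startsWith "B-"
    · have hne := pvSegs_ne_nil t (tok, tag)
      rw [if_pos hb, if_pos hb, pvEmit_cons _ _ _ hne]
      by_cases hw : cw ≠ ""
      · rw [if_pos hw, if_pos hw, ih]
        simp
      · rw [if_neg hw, if_neg hw, ih]
    · rw [if_neg hb, if_neg hb]
      by_cases ho : tag == "O"
      · simp only [hb, Bool.false_or, ho, if_pos]
        exact ih (cw ++ tok) ct ws ts
      · simp only [hb, Bool.false_or, ho]
        exact ih cw ct ws ts

-- ===== VERDICT (by name: the statement is the Claim_ definition above) =====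
theorem get_word_level_tags_spec : Claim_equal_get_word_level_tags := by
  intro tokens token_tags _
  unfold Spec_get_word_level_tags get_word_level_tags get_word_level_tags_alt
  rw [pvLoopA_eq]
  simp
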